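-- pv_equiv track=rewrite | github.com/Type-Here/med-vix-ray | src/vindr-test.py | map_vindr_row_to_mimic
-- ===== SOURCE A (Python) =====
-- vindr_to_mimic_mapping = {
--     "Atelectasis": "Atelectasis",
--     "Cardiomegaly": "Cardiomegaly",
--     "Consolidation": "Consolidation",
--     "Edema": "Edema",
--     "Enlarged PA": "Enlarged Cardiomediastinum",
--     "Mediastinal shift": "Enlarged Cardiomediastinum",
--     "Clavicle fracture": "Fracture",
--     "Rib fracture": "Fracture",
--     "Lung cavity": "Lung Lesion",
--     "Lung cyst": "Lung Lesion",
--     "Nodule/Mass": "Lung Lesion",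
--     "Lung tumor": "Lung Lesion",
--     "Other lesion": "Lung Lesion",
--     "Lung Opacity": "Lung Opacity",
--     "Infiltration": "Lung Opacity",
--     "Pleural effusion": "Pleural Effusion",
--     "Pleural thickening": "Pleural Other",
--     "Pulmonary fibrosis": "Pleural Other",
--     "ILD": "Pleural Other",
--     "Pneumothorax": "Pneumothorax",
--     "Pneumonia": "Pneumonia",
--     "Tuberculosis": "Lung Lesion",  # Opzionale
--     "No finding": "No Finding",
--     # Labels without mapping are ignored
-- }
--
-- MIMIC_LABELS = ["Atelectasis", "Cardiomegaly", "Consolidation", "Edema",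
--                 "Enlarged Cardiomediastinum", "Fracture", "Lung Lesion",
--                 "Lung Opacity", "No Finding", "Pleural Effusion", "Pleural Other",
--                 "Pneumonia", "Pneumothorax", "Support Devices"]  # Support Devices → no match in VINDR
--
-- def map_vindr_row_to_mimic(vindr_row: dict) -> list:
--     """
--     Given a VINDR row (label: 0/1), returns a MIMIC row (list of 0/1 values in correct order).
--     If multiple VINDR labels map to one MIMIC label, we take OR across them.
--     """
--     mimic_row = [0] * len(MIMIC_LABELS)
--     for vindr_label, value in vindr_row.items():
--         if vindr_label in vindr_to_mimic_mapping:
--             mimic_label = vindr_to_mimic_mapping[vindr_label]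
--             mimic_idx = MIMIC_LABELS.index(mimic_label)
--             # Take OR: if any mapping is 1 → set 1
--             if value == 1:
--                 mimic_row[mimic_idx] = 1
--     return mimic_row
-- ===== SOURCE B (Python) =====
-- # Inverted index: MIMIC labels in order, each with the VINDR labels that map to it.
-- MIMIC_GROUPS = [
--     ("Atelectasis", ["Atelectasis"]),
--     ("Cardiomegaly", ["Cardiomegaly"]),
--     ("Consolidation", ["Consolidation"]),
--     ("Edema", ["Edema"]),
--     ("Enlarged Cardiomediastinum", ["Enlarged PA", "Mediastinal shift"]),
--     ("Fracture", ["Clavicle fracture", "Rib fracture"]),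
--     ("Lung Lesion", ["Lung cavity", "Lung cyst", "Nodule/Mass", "Lung tumor",
--                      "Other lesion", "Tuberculosis"]),
--     ("Lung Opacity", ["Lung Opacity", "Infiltration"]),
--     ("No Finding", ["No finding"]),
--     ("Pleural Effusion", ["Pleural effusion"]),
--     ("Pleural Other", ["Pleural thickening", "Pulmonary fibrosis", "ILD"]),
--     ("Pneumonia", ["Pneumonia"]),
--     ("Pneumothorax", ["Pneumothorax"]),
--     ("Support Devices", []),
-- ]
--
--
-- def map_vindr_row_to_mimic(vindr_row: dict) -> list:
--     """Output-driven: each MIMIC entry is 1 iff some VINDR label of its group has value 1."""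
--     return [1 if any(vindr_row.get(vl) == 1 for vl in group) else 0
--             for _, group in MIMIC_GROUPS]
-- ===== Notes on version B (the rewrite author's own statement) =====
-- stated objective: alternative
-- what changed: Replaces A's input-driven loop (mutating a preallocated row via MIMIC_LABELS.index per item) with an output-driven comprehension over a precomputed inverted index (MIMIC label -> its VINDR labels), each entry an any() of .get lookups on the row.
import Mathlib
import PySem

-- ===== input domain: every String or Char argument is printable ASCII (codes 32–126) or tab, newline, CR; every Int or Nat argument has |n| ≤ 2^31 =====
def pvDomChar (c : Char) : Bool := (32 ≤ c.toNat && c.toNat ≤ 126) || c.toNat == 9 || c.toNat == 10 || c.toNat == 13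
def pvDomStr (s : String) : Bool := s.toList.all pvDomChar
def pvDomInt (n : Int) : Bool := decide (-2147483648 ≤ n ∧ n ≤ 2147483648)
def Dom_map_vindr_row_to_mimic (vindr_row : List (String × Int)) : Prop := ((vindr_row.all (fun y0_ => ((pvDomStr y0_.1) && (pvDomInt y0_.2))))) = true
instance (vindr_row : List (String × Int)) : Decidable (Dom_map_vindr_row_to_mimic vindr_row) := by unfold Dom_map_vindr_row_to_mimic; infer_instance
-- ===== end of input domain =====

-- B replaces A's input-driven loop (mutating an output row via .index) by an output-driven pass
-- over a precomputed inverted index (MIMIC label -> its VINDR labels); objective: alternative.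
-- Return-value equivalence only (A mutates nothing observable).

-- ===== PORT A =====
-- module constant: vindr_to_mimic_mapping (a dict, insertion order)
def vmap : PySem.Dict String String := PySem.Dict.ofList
  [("Atelectasis", "Atelectasis"), ("Cardiomegaly", "Cardiomegaly"),
   ("Consolidation", "Consolidation"), ("Edema", "Edema"),
   ("Enlarged PA", "Enlarged Cardiomediastinum"), ("Mediastinal shift", "Enlarged Cardiomediastinum"),
   ("Clavicle fracture", "Fracture"), ("Rib fracture", "Fracture"),
   ("Lung cavity", "Lung Lesion"), ("Lung cyst", "Lung Lesion"),
   ("Nodule/Mass", "Lung Lesion"), ("Lung tumor", "Lung Lesion"),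
   ("Other lesion", "Lung Lesion"), ("Lung Opacity", "Lung Opacity"),
   ("Infiltration", "Lung Opacity"), ("Pleural effusion", "Pleural Effusion"),
   ("Pleural thickening", "Pleural Other"), ("Pulmonary fibrosis", "Pleural Other"),
   ("ILD", "Pleural Other"), ("Pneumothorax", "Pneumothorax"),
   ("Pneumonia", "Pneumonia"), ("Tuberculosis", "Lung Lesion"),
   ("No finding", "No Finding")]

-- module constant: MIMIC_LABELS
def mimicLabels : List String :=
  ["Atelectasis", "Cardiomegaly", "Consolidation", "Edema",
   "Enlarged Cardiomediastinum", "Fracture", "Lung Lesion",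
   "Lung Opacity", "No Finding", "Pleural Effusion", "Pleural Other",
   "Pneumonia", "Pneumothorax", "Support Devices"]

-- A's loop body: `if vindr_label in mapping: mimic_label = mapping[vindr_label];
-- mimic_idx = MIMIC_LABELS.index(mimic_label); if value == 1: mimic_row[mimic_idx] = 1`.
-- `in` + `[...]` is the `get?` match; `.index` is `index?` (its ValueError branch is unreachable:
-- every mapping value is in MIMIC_LABELS, so the `.getD 0` default is never consulted).
def stepA (mimic_row : List Int) (p : String × Int) : List Int :=
  match vmap.get? p.1 with
  | some mimic_label =>
      let mimic_idx := (PySem.List.index? mimicLabels mimic_label).getD 0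
      if p.2 = 1 then PySem.List.pySetD mimic_row (mimic_idx : Int) 1 else mimic_row
  | none => mimic_row

-- A: `mimic_row = [0] * len(MIMIC_LABELS)`, then `for vindr_label, value in vindr_row.items(): …`.
-- The dict argument arrives as an association list; `Dict.ofList` builds the dict (last value wins
-- on a duplicated key, as when Python builds the dict) and `.items` is `.items()`.
def map_vindr_row_to_mimic (vindr_row : List (String × Int)) : List Int :=
  (PySem.Dict.ofList vindr_row).items.foldl stepA (List.replicate mimicLabels.length 0)

-- ===== PORT B =====
-- B's module constant MIMIC_GROUPS: the inverted index, MIMIC labels in order with their VINDR labels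
def mimicGroups : List (String × List String) :=
  [("Atelectasis", ["Atelectasis"]),
   ("Cardiomegaly", ["Cardiomegaly"]),
   ("Consolidation", ["Consolidation"]),
   ("Edema", ["Edema"]),
   ("Enlarged Cardiomediastinum", ["Enlarged PA", "Mediastinal shift"]),
   ("Fracture", ["Clavicle fracture", "Rib fracture"]),
   ("Lung Lesion", ["Lung cavity", "Lung cyst", "Nodule/Mass", "Lung tumor",
                    "Other lesion", "Tuberculosis"]),
   ("Lung Opacity", ["Lung Opacity", "Infiltration"]),
   ("No Finding", ["No finding"]),
   ("Pleural Effusion", ["Pleural effusion"]),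
   ("Pleural Other", ["Pleural thickening", "Pulmonary fibrosis", "ILD"]),
   ("Pneumonia", ["Pneumonia"]),
   ("Pneumothorax", ["Pneumothorax"]),
   ("Support Devices", [])]

-- B: `[1 if any(vindr_row.get(vl) == 1 for vl in group) else 0 for _, group in MIMIC_GROUPS]`
def map_vindr_row_to_mimic_alt (vindr_row : List (String × Int)) : List Int :=
  let d := PySem.Dict.ofList vindr_row
  mimicGroups.map (fun g => if g.2.any (fun vl => d.get? vl == some 1) then 1 else 0)

-- ===== PRECONDITION & SPEC =====
def Spec_map_vindr_row_to_mimic (vindr_row : List (String × Int)) (out : List Int) : Prop := out = map_vindr_row_to_mimic_alt vindr_row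
instance (vindr_row : List (String × Int)) (out : List Int) : Decidable (Spec_map_vindr_row_to_mimic vindr_row out) := by unfold Spec_map_vindr_row_to_mimic; infer_instance

-- ===== CLAIM (what is proved, stated in full; the proofs are below) =====
def Claim_equal_map_vindr_row_to_mimic : Prop := ∀ (vindr_row : List (String × Int)), Dom_map_vindr_row_to_mimic vindr_row → Spec_map_vindr_row_to_mimic vindr_row (map_vindr_row_to_mimic vindr_row)

-- ===== LEMMAS AND PROOFS =====

-- A's per-item hit condition for output index i
def hitP (i : Nat) (hi : i < mimicLabels.length) (p : String × Int) : Bool :=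
  p.2 == 1 && vmap.get? p.1 == some (mimicLabels[i]'hi)

-- every mapping value occurs in MIMIC_LABELS (so A's `.index` always finds it)
lemma index?_of_mem_values : ∀ ml ∈ vmap.values, (PySem.List.index? mimicLabels ml).isSome = true := by
  decide

lemma mimicLabels_nodup : mimicLabels.Nodup := by decide

lemma stepA_length (r : List Int) (p : String × Int) : (stepA r p).length = r.length := by
  unfold stepA
  cases h : vmap.get? p.1 <;> simp
  split <;> simp

lemma foldA_length (l : List (String × Int)) (r : List Int) :
    (l.foldl stepA r).length = r.length := by
  induction l generalizing r with
  | nil => rfl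
  | cons p l ih => rw [List.foldl_cons, ih, stepA_length]

lemma foldA_getElem? (l : List (String × Int)) (r : List Int)
    (hr : r.length = mimicLabels.length) (i : Nat) (hi : i < mimicLabels.length) :
    (l.foldl stepA r)[i]? = if l.any (hitP i hi) then some 1 else r[i]? := by
  induction l generalizing r with
  | nil => simp
  | cons p l ih =>
    rw [List.foldl_cons, ih (stepA r p) (by rw [stepA_length, hr])]
    by_cases hany : l.any (hitP i hi) = true
    · simp [hany]
    · simp only [hany, List.any_cons, Bool.or_false]
      unfold stepA
      cases hml : vmap.get? p.1 with
      | none => simp [hitP, hml]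
      | some ml =>
        have hmem : ml ∈ vmap.values := by
          have h1 := PySem.Dict.mem_items_of_get?_eq_some (d := vmap) hml
          have h2 : ml ∈ vmap.items.map (·.2) := List.mem_map.mpr ⟨_, h1, rfl⟩
          simpa [PySem.Dict.values] using h2
        obtain ⟨j, hj⟩ := Option.isSome_iff_exists.mp (index?_of_mem_values ml hmem)
        obtain ⟨hjlt, hjget, _⟩ := PySem.List.getElem_of_index?_eq_some hj
        have hiff : ml = mimicLabels[i]'hi ↔ j = i := by
          constructor
          · intro h
            exact (List.Nodup.getElem_inj_iff mimicLabels_nodup).mp (by rw [hjget, h])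
          · intro h; subst h; exact hjget.symm
        simp only [hj, Option.getD_some]
        by_cases hv : p.2 = 1
        · simp only [hv, if_true, PySem.List.pySetD_natCast, List.getElem?_set]
          by_cases hji : j = i
          · subst hji
            simp [hitP, hml, hv, hjget, hr, hi]
          · have hne : ¬ (ml = mimicLabels[i]'hi) := fun h => hji (hiff.mp h)
            simp [hitP, hml, hv, hji, hne]
        · simp [hitP, hml, hv]

-- forward/backward checks between the forward dict and one group, lifted to all keys
-- each group is exactly the preimage of its MIMIC label under the forward dict (checked by decide)
lemma groups_spec : ∀ g ∈ mimicGroups,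
    (∀ k ∈ vmap.keys, vmap.get? k = some g.1 → k ∈ g.2) ∧
    (∀ k ∈ g.2, vmap.get? k = some g.1) := by
  decide

lemma labels_eq : mimicGroups.map (·.1) = mimicLabels := by decide

-- lift groups_spec from vmap's (finite) key list to all keys
lemma bridge (g : String × List String) (hg : g ∈ mimicGroups) :
    ∀ k, vmap.get? k = some g.1 ↔ k ∈ g.2 := by
  intro k
  constructor
  · intro h
    exact (groups_spec g hg).1 k
      (PySem.Dict.mem_keys_of_mem_items vmap (PySem.Dict.mem_items_of_get?_eq_some vmap h)) h
  · exact (groups_spec g hg).2 k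

-- A's `any` over the row's items equals B's `any` over a group, whenever the group is
-- exactly the preimage of the label under the forward mapping
lemma any_eq_groups (d : PySem.Dict String Int) (hnd : d.keys.Nodup) (ml : String)
    (gl : List String) (hiff : ∀ k, vmap.get? k = some ml ↔ k ∈ gl) :
    d.items.any (fun p => p.2 == 1 && vmap.get? p.1 == some ml)
      = gl.any (fun vl => d.get? vl == some 1) := by
  rw [Bool.eq_iff_iff]
  simp only [List.any_eq_true, Bool.and_eq_true, beq_iff_eq]
  constructor
  · rintro ⟨p, hp, hv, hm⟩
    refine ⟨p.1, (hiff p.1).mp hm, ?_⟩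
    have hp' : (p.1, p.2) ∈ d.items := hp
    rw [PySem.Dict.get?_of_mem_items d hp' hnd, hv]
  · rintro ⟨vl, hvl, hg⟩
    exact ⟨(vl, 1), PySem.Dict.mem_items_of_get?_eq_some d hg, rfl, (hiff vl).mpr hvl⟩

-- ===== VERDICT (by name: the statement is the Claim_ definition above) =====
theorem map_vindr_row_to_mimic_spec : Claim_equal_map_vindr_row_to_mimic := by
  intro vindr_row _
  unfold Spec_map_vindr_row_to_mimic map_vindr_row_to_mimic map_vindr_row_to_mimic_alt
  have hnd : (PySem.Dict.ofList vindr_row).keys.Nodup := PySem.Dict.nodup_keys_ofList _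
  apply List.ext_getElem?
  intro i
  by_cases hi : i < mimicLabels.length
  · rw [foldA_getElem? _ _ (by simp) i hi]
    have hig : i < mimicGroups.length := hi
    rw [List.getElem?_map, List.getElem?_eq_getElem hig, Option.map_some]
    have hany : (PySem.Dict.ofList vindr_row).items.any (hitP i hi)
        = (mimicGroups[i]'hig).2.any
            (fun vl => (PySem.Dict.ofList vindr_row).get? vl == some 1) := by
      have hml : mimicLabels[i]'hi = (mimicGroups[i]'hig).1 := by
        rw [List.getElem_of_eq labels_eq.symm hi, List.getElem_map]
      unfold hitP
      simp only [hml]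
      exact any_eq_groups _ hnd _ _ (bridge _ (List.getElem_mem hig))
    rw [hany]
    split_ifs <;> simp [hi]
  · have h1 : ¬ i < ((PySem.Dict.ofList vindr_row).items.foldl stepA
        (List.replicate mimicLabels.length 0)).length := by
      rw [foldA_length]; simpa using hi
    rw [List.getElem?_eq_none (le_of_not_gt h1),
      List.getElem?_eq_none (le_of_not_gt (by simpa using hi))]
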